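-- pv_equiv track=rewrite | github.com/palmerbayless123/KMZ-Optimizer | data_merger.py | group_locations_by_state
-- ===== SOURCE A (Python) =====
-- def group_locations_by_state(final_locations):
--     """
--     Group locations by state for state-level KMZ generation.
--
--     Args:
--         final_locations (list): List of location dicts with 'source' and 'data' keys
--
--     Returns:
--         dict: Mapping of state code -> list of location data dicts
--     """
--     states = {}
--
--     for loc in final_locations:
--         data = loc['data']
--         state = data.get('State Code', data.get('State', 'Unknown'))
--
--         if state not in states:
--             states[state] = []
--
--         states[state].append(data)
--
--     return states
-- ===== SOURCE B (Python) =====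
-- def group_locations_by_state(final_locations):
--     datas = [loc['data'] for loc in final_locations]
--     keys = [d.get('State Code', d.get('State', 'Unknown')) for d in datas]
--     return {k: [d for d, kk in zip(datas, keys) if kk == k]
--             for k in dict.fromkeys(keys)}
-- ===== Notes on version B (the rewrite author's own statement) =====
-- stated objective: alternative
-- what changed: Replaces A's single-pass mutable-dict accumulator with a declarative two-phase build: extract all state keys, dedup them in first-appearance order via dict.fromkeys, and form each group by filtering the zipped (data, key) list.
import Mathlib
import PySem

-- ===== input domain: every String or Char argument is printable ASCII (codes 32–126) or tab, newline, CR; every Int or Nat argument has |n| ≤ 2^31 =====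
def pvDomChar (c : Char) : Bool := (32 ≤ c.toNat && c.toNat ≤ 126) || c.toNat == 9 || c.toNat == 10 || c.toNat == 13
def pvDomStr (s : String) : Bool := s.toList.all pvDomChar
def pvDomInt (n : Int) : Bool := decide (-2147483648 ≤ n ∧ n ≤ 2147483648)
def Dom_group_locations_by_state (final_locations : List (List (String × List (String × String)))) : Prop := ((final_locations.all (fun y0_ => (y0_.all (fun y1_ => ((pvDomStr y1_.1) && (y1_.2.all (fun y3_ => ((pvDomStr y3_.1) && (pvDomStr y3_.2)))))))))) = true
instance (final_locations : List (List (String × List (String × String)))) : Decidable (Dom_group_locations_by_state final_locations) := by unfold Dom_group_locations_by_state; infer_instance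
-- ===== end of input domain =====

-- B groups by a declarative two-phase build (dedup the key list, then filter per key) instead of
-- A's single-pass mutable-dict accumulator; same values, same key and group order (alternative, not faster).

-- ===== PORT A =====
-- shared accessors (the identical Python expressions occur in both Source A and Source B):
-- loc['data'] — first-match lookup; Pre_ guarantees the key is present, so the .getD [] default is never used
def pvData (loc : List (String × List (String × String))) : List (String × String) :=
  ((PySem.Dict.mk loc).get? "data").getD []
-- data.get('State Code', data.get('State', 'Unknown'))
def pvKey (data : List (String × String)) : String :=
  (PySem.Dict.mk data).getD "State Code" ((PySem.Dict.mk data).getD "State" "Unknown")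

def group_locations_by_state (final_locations : List (List (String × List (String × String)))) : List (String × List (List (String × String))) :=
  (final_locations.foldl (fun states loc =>
      let data := pvData loc
      let state := pvKey data
      let states := if states.contains state then states else states.insert state []
      -- states[state].append(data): the key is present here, so the [] default of modify is never used
      states.modify state [] (fun v => v ++ [data]))
    PySem.Dict.empty).items

-- ===== PORT B =====
def group_locations_by_state_alt (final_locations : List (List (String × List (String × String)))) : List (String × List (List (String × String))) :=
  let datas := final_locations.map pvData
  let keys := datas.map pvKey
  -- dict comprehension over dict.fromkeys(keys) (= PySem.List.dedup keys)
  ((PySem.List.dedup keys).foldl (fun d k =>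
      d.insert k (((datas.zip keys).filter (fun p => p.2 == k)).map (fun p => p.1)))
    PySem.Dict.empty).items

-- ===== PRECONDITION & SPEC =====
-- Pre_ excludes exactly the inputs where some location lacks the 'data' key, on which A raises KeyError.
def Pre_group_locations_by_state (final_locations : List (List (String × List (String × String)))) : Prop :=
  (final_locations.all (fun loc => loc.any (fun p => p.1 == "data"))) = true
instance (final_locations : List (List (String × List (String × String)))) : Decidable (Pre_group_locations_by_state final_locations) := by unfold Pre_group_locations_by_state; infer_instance
def pvWitness_group_locations_by_state : (List (List (String × List (String × String)))) :=
  [[("data", [("State Code", "CA")])], [("data", [("State", "NY")])]]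
def Spec_group_locations_by_state (final_locations : List (List (String × List (String × String)))) (out : List (String × List (List (String × String)))) : Prop := out = group_locations_by_state_alt final_locations
instance (final_locations : List (List (String × List (String × String)))) (out : List (String × List (List (String × String)))) : Decidable (Spec_group_locations_by_state final_locations out) := by unfold Spec_group_locations_by_state; infer_instance

-- ===== CLAIM (what is proved, stated in full; the proofs are below) =====
def Claim_equal_group_locations_by_state : Prop := ∀ (final_locations : List (List (String × List (String × String)))), Dom_group_locations_by_state final_locations → Pre_group_locations_by_state final_locations → Spec_group_locations_by_state final_locations (group_locations_by_state final_locations)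

-- ===== LEMMAS AND PROOFS =====

-- A's loop body ('setdefault then append') is one modify
theorem pv_step_eq_modify (d : PySem.Dict String (List (List (String × String)))) (k : String)
    (x : List (String × String)) :
    (if d.contains k then d else d.insert k []).modify k [] (fun v => v ++ [x])
      = d.modify k [] (fun v => v ++ [x]) := by
  by_cases h : d.contains k = true
  · simp [h]
  · simp only [Bool.not_eq_true] at h
    simp [h, PySem.Dict.modify, PySem.Dict.insert_insert_self,
      PySem.Dict.getD_insert_self, PySem.Dict.getD_of_not_contains _ _ h]

theorem group_locations_by_state_spec : Claim_equal_group_locations_by_state := by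
  intro fl _ _
  unfold Spec_group_locations_by_state
  unfold group_locations_by_state group_locations_by_state_alt
  -- rewrite A's fold body to a single modify, then to a fold over key/data pairs
  have hA : (fl.foldl (fun states loc =>
      let data := pvData loc
      let state := pvKey data
      let states := if states.contains state then states else states.insert state []
      states.modify state [] (fun v => v ++ [data])) PySem.Dict.empty)
      = ((fl.map (fun loc => (pvKey (pvData loc), pvData loc))).foldl
          (fun d p => d.modify p.1 [] (fun v => v ++ [p.2])) PySem.Dict.empty) := by
    rw [List.foldl_map]
    have hfun : (fun (states : PySem.Dict String (List (List (String × String)))) loc =>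
        let data := pvData loc
        let state := pvKey data
        let states := if states.contains state then states else states.insert state []
        states.modify state [] (fun v => v ++ [data]))
        = (fun d loc => d.modify (pvKey (pvData loc)) [] (fun v => v ++ [pvData loc])) := by
      funext d loc
      exact pv_step_eq_modify d (pvKey (pvData loc)) (pvData loc)
    rw [hfun]
  rw [hA]
  -- B: fresh distinct keys ⇒ the dict-comprehension items are just the map over dedup'd keys
  have hB : ((PySem.List.dedup ((fl.map pvData).map pvKey)).foldl (fun d k =>
        d.insert k ((((fl.map pvData).zip ((fl.map pvData).map pvKey)).filter (fun p => p.2 == k)).map (fun p => p.1)))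
      PySem.Dict.empty).items
      = (PySem.List.dedup ((fl.map pvData).map pvKey)).map (fun k =>
          (k, (((fl.map pvData).zip ((fl.map pvData).map pvKey)).filter (fun p => p.2 == k)).map (fun p => p.1))) := by
    rw [PySem.Dict.items_foldl_insert_fresh _ _ _ _ (fun a _ => PySem.Dict.contains_empty a)
      (by simp)]
    simp [PySem.Dict.empty]
  simp only [hB]
  -- A: items via keys + getD
  set ps := fl.map (fun loc => (pvKey (pvData loc), pvData loc)) with hps
  have hnodup : (ps.foldl (fun d p => d.modify p.1 [] (fun v => v ++ [p.2])) PySem.Dict.empty).keys.Nodup :=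
    PySem.Dict.nodup_keys_foldl_modify_key ps (fun p => p.1) [] (fun _ p v => v ++ [p.2])
      PySem.Dict.empty PySem.Dict.nodup_keys_empty
  rw [PySem.Dict.items_eq_map_keys _ hnodup []]
  have hkeys : (ps.foldl (fun d p => d.modify p.1 [] (fun v => v ++ [p.2])) PySem.Dict.empty).keys
      = PySem.List.dedup ((fl.map pvData).map pvKey) := by
    rw [PySem.Dict.keys_foldl_modify_key ps (fun p => p.1) [] (fun _ p v => v ++ [p.2])]
    rw [PySem.List.dedup_eq_ofList, PySem.Set.ofList_eq_foldl, PySem.Set.update_eq_foldl]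
    congr 1
    rw [hps, List.map_map, List.map_map]
    rfl
  rw [hkeys]
  refine List.map_congr_left (fun k _ => ?_)
  have hval := PySem.Dict.getD_foldl_modify_append ps PySem.Dict.empty k
  rw [hval]
  simp only [PySem.Dict.getD_of_not_contains _ _ (PySem.Dict.contains_empty k), List.nil_append]
  rw [List.map_map, List.zip_map']
  simp only [hps, List.filter_map, List.map_map]
  rfl
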